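-- pv_equiv track=rewrite | github.com/pablooliva/sift | mcp_server/txtai_rag_mcp.py | _compute_entity_breakdown
-- ===== SOURCE A (Python) =====
-- from collections import Counter, defaultdict
-- from typing import Any, Dict, List, Optional
--
-- def _compute_entity_breakdown(entities: List[Dict]) -> Optional[Dict[str, int]]:
--     """
--     Compute entity type breakdown, omitting if all types are uninformative.
--
--     Implements SPEC-039 REQ-007: Omit breakdown when all types are null/Entity.
--
--     Returns:
--         Dict of {type: count} or None if breakdown would be uninformative
--     """
--     type_counts = Counter()
--     has_semantic_type = False
--
--     for entity in entities:
--         # REQ-007: Defensive handling of labels field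
--         labels = entity.get('labels', ['Entity'])
--
--         # Handle missing, null, non-list, or empty labels
--         if not labels or not isinstance(labels, list) or len(labels) == 0:
--             labels = ['Entity']
--
--         # Check if any label is NOT 'Entity' (i.e., has semantic meaning)
--         entity_type = labels[0]  # Use first label
--         if entity_type != 'Entity':
--             has_semantic_type = True
--
--         type_counts[entity_type] += 1
--
--     # REQ-007: Omit breakdown if no semantic types exist
--     if not has_semantic_type:
--         return None
--
--     return dict(type_counts.most_common())
-- ===== SOURCE B (Python) =====
-- from typing import Dict, List, Optional
--
--
-- def _effective_type(entity: Dict) -> str: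
--     labels = entity.get('labels')
--     return labels[0] if isinstance(labels, list) and labels else 'Entity'
--
--
-- def _compute_entity_breakdown(entities: List[Dict]) -> Optional[Dict[str, int]]:
--     types = [_effective_type(e) for e in entities]
--     distinct = list(dict.fromkeys(types))
--     if distinct in ([], ['Entity']):
--         return None
--     pairs = [(t, types.count(t)) for t in distinct]
--     pairs.sort(key=lambda p: p[1], reverse=True)
--     return dict(pairs)
-- ===== Notes on version B (the rewrite author's own statement) =====
-- stated objective: alternative
-- what changed: Drops the Counter/hash counting and the running has_semantic_type flag entirely: B collects the effective types, dedups them in first-occurrence order via dict.fromkeys, decides the omit-as-None case by checking whether the distinct-type list is empty or the single uninformative type, counts each distinct type with list.count scans, and stable-sorts the pairs by count descending.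
import Mathlib
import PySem

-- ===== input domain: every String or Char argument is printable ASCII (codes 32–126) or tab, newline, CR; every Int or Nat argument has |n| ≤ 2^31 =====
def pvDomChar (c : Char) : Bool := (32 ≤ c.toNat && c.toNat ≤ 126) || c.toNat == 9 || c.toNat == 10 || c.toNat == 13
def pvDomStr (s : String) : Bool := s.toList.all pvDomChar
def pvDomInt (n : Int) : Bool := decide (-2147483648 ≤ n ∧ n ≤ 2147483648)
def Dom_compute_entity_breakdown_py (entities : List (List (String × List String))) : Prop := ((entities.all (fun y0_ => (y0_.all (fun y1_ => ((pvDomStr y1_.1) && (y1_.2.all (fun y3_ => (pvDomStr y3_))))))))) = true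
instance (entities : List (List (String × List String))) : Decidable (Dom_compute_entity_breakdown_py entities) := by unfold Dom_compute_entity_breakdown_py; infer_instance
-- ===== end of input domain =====

-- B replaces A's Counter plus running has_semantic_type flag by dedup-in-order +
-- per-type count scans, deciding the None case from the distinct-type list; same
-- results, B trades the hash counter for O(n·k) scans (objective: alternative).

-- ===== PORT A =====
-- A: one fused loop maintaining (type_counts, has_semantic_type); then most_common.
def compute_entity_breakdown_py (entities : List (List (String × List String))) : Option (List (String × Int)) :=
  let st := entities.foldl
    (fun (st : PySem.Dict String Int × Bool) entity =>
      let labels := (PySem.Dict.mk entity).getD "labels" ["Entity"]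
      let labels := if labels = [] then ["Entity"] else labels
      let entity_type := labels.headD "Entity"   -- labels[0]; labels is nonempty here
      (st.1.modify entity_type 0 (· + 1), st.2 || decide (entity_type ≠ "Entity")))
    ((PySem.Dict.empty : PySem.Dict String Int), false)
  if st.2 = false then none
  else some (PySem.List.sorted st.1.items (fun p => p.2) true)

-- ===== PORT B =====
-- labels[0] if isinstance(labels, list) and labels else 'Entity'
def pvEtype (entity : List (String × List String)) : String :=
  match (PySem.Dict.mk entity).get? "labels" with
  | some (t :: _) => t
  | _ => "Entity"

def compute_entity_breakdown_py_alt (entities : List (List (String × List String))) : Option (List (String × Int)) :=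
  let types := entities.map pvEtype
  let distinct := PySem.List.dedup types
  if distinct = [] ∨ distinct = ["Entity"] then none
  else
    let pairs := distinct.map (fun t => (t, (types.count t : Int)))
    some (PySem.List.sorted pairs (fun p => p.2) true)

-- ===== PRECONDITION & SPEC =====
def Spec_compute_entity_breakdown_py (entities : List (List (String × List String))) (out : Option (List (String × Int))) : Prop := out = compute_entity_breakdown_py_alt entities
instance (entities : List (List (String × List String))) (out : Option (List (String × Int))) : Decidable (Spec_compute_entity_breakdown_py entities out) := by unfold Spec_compute_entity_breakdown_py; infer_instance

-- ===== CLAIM (what is proved, stated in full; the proofs are below) =====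
def Claim_equal_compute_entity_breakdown_py : Prop := ∀ (entities : List (List (String × List String))), Dom_compute_entity_breakdown_py entities → Spec_compute_entity_breakdown_py entities (compute_entity_breakdown_py entities)

-- ===== LEMMAS AND PROOFS =====

-- A's per-entity effective type equals B's helper.
theorem pvEtype_eq (entity : List (String × List String)) :
    (let labels := (PySem.Dict.mk entity).getD "labels" ["Entity"]
     let labels := if labels = [] then ["Entity"] else labels
     labels.headD "Entity") = pvEtype entity := by
  unfold pvEtype
  rw [PySem.Dict.getD_eq_get?_getD]
  rcases h : (PySem.Dict.mk entity).get? "labels" with _ | ⟨_ | ⟨t, ts⟩⟩ <;> simp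

-- A's fused loop equals (counter of the extracted types, flag = any non-'Entity' type).
theorem loopA_eq (entities : List (List (String × List String)))
    (d : PySem.Dict String Int) (b : Bool) :
    entities.foldl
      (fun (st : PySem.Dict String Int × Bool) entity =>
        let labels := (PySem.Dict.mk entity).getD "labels" ["Entity"]
        let labels := if labels = [] then ["Entity"] else labels
        let entity_type := labels.headD "Entity"
        (st.1.modify entity_type 0 (· + 1), st.2 || decide (entity_type ≠ "Entity")))
      (d, b)
    = ((entities.map pvEtype).foldl (fun d t => d.modify t 0 (· + 1)) d,
       b || (entities.map pvEtype).any (fun t => decide (t ≠ "Entity"))) := by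
  induction entities generalizing d b with
  | nil => simp
  | cons e es ih =>
      simp only [List.foldl_cons, List.map_cons, List.any_cons]
      rw [show (let labels := (PySem.Dict.mk e).getD "labels" ["Entity"]
                let labels := if labels = [] then ["Entity"] else labels
                labels.headD "Entity") = pvEtype e from pvEtype_eq e] at *
      rw [ih]
      simp [Bool.or_assoc]

-- If every element is "Entity", the ordered dedup is [] or ["Entity"].
theorem ofList_all_entity (ts : List String) (h : ∀ t ∈ ts, t = "Entity") :
    PySem.Set.ofList ts = [] ∨ PySem.Set.ofList ts = ["Entity"] := by
  induction ts with
  | nil => left; rfl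
  | cons x xs ih =>
      have hx : x = "Entity" := h x (List.mem_cons_self ..)
      have := ih (fun t ht => h t (List.mem_cons_of_mem _ ht))
      rw [PySem.Set.ofList_cons, hx]
      rcases this with h0 | h0 <;> rw [h0] <;> right <;> rfl

-- A's flag is false iff B's distinct list is [] or ["Entity"].
theorem flag_iff (ts : List String) :
    (ts.any (fun t => decide (t ≠ "Entity")) = false)
    ↔ (PySem.List.dedup ts = [] ∨ PySem.List.dedup ts = ["Entity"]) := by
  simp only [PySem.List.dedup_eq_ofList, List.any_eq_false]
  constructor
  · intro h
    exact ofList_all_entity ts (fun t ht => by simpa using h t ht)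
  · intro h t ht
    have hm : t ∈ PySem.Set.ofList ts := (PySem.Set.mem_ofList ts t).2 ht
    rcases h with h | h <;> rw [h] at hm <;> simp at hm <;> simp [hm]

-- ===== VERDICT (by name: the statement is the Claim_ definition above) =====
theorem compute_entity_breakdown_py_spec : Claim_equal_compute_entity_breakdown_py := by
  intro entities _
  unfold Spec_compute_entity_breakdown_py compute_entity_breakdown_py compute_entity_breakdown_py_alt
  rw [loopA_eq]
  simp only [Bool.false_or]
  by_cases h : (entities.map pvEtype).any (fun t => decide (t ≠ "Entity")) = false
  · rw [if_pos h, if_pos ((flag_iff _).1 h)]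
  · rw [if_neg h, if_neg (fun hc => h ((flag_iff _).2 hc))]
    congr 1
    rw [show ((entities.map pvEtype).foldl (fun d t => d.modify t 0 (· + 1)) PySem.Dict.empty)
          = PySem.Dict.counter (entities.map pvEtype) from (PySem.Dict.counter_eq_foldl _).symm,
        PySem.Dict.items_counter]
    simp [PySem.List.dedup_eq_ofList]
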